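-- pv_equiv track=rewrite | github.com/ludwigpeking/VorteGoWebsite | python_training/bensons_algorithm.py | _build_regions
-- ===== SOURCE A (Python) =====
-- from typing import Dict, Set, Tuple, Iterable, Hashable
--
-- Vid = Hashable
--
-- Color = str  # 'black' or 'white'
--
-- Stones = Dict[Vid, Color]
--
-- Adjacency = Dict[Vid, Set[Vid]]
--
-- def _build_regions(stones: Stones, adj: Adjacency, color: Color,
--                    vid_to_chain: Dict[Vid, int]) -> list:
--     """Find maximal connected regions of non-`color` points. For each region,
--     record:
--       - points: set of vids in the region (empty or opposite color)
--       - bordering_chains: set of `color` chain indices adjacent to the region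
--       - vital_chains: subset of bordering_chains for which every *empty* point
--         in the region is adjacent to some stone of that chain (Benson vitality).
--     """
--     regions: list = []
--     visited: Set[Vid] = set()
--     for vid in adj:
--         if vid in visited or stones.get(vid) == color:
--             continue
--         points: Set[Vid] = set()
--         bordering: Set[int] = set()
--         stack = [vid]
--         while stack:
--             v = stack.pop()
--             if v in points:
--                 continue
--             points.add(v)
--             for nid in adj[v]:
--                 if stones.get(nid) == color:
--                     bordering.add(vid_to_chain[nid])
--                 elif nid not in points:
--                     stack.append(nid)
--         visited |= points
--
--         # Vital chains: chains adjacent to *every* empty point in this region.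
--         vital: Set[int] = set(bordering)
--         for p in points:
--             if stones.get(p) is not None:
--                 continue  # opp stone inside — does not constrain vitality (std Go)
--             adj_chains: Set[int] = set()
--             for nid in adj[p]:
--                 if stones.get(nid) == color:
--                     adj_chains.add(vid_to_chain[nid])
--             vital &= adj_chains
--             if not vital:
--                 break
--
--         regions.append({
--             'points': points,
--             'bordering_chains': bordering,
--             'vital_chains': vital,
--         })
--     return regions
-- ===== SOURCE B (Python) =====
-- def _build_regions(stones, adj, color, vid_to_chain):
--     """Single fused flood-fill pass: bordering chains and the Benson vitality
--     intersection are accumulated while the region is discovered, instead of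
--     re-scanning every empty point's neighbourhood in a second phase."""
--     regions = []
--     visited = set()
--     for vid in adj:
--         if vid in visited or stones.get(vid) == color:
--             continue
--         points = set()
--         bordering = set()
--         vital = None  # intersection of chain-sets of the empty points seen so far
--         stack = [vid]
--         while stack:
--             v = stack.pop()
--             if v in points:
--                 continue
--             points.add(v)
--             if stones.get(v) is None:
--                 adj_chains = set()
--                 for nid in adj[v]:
--                     if stones.get(nid) == color:
--                         c = vid_to_chain[nid]
--                         bordering.add(c)
--                         adj_chains.add(c)
--                     elif nid not in points:
--                         stack.append(nid)
--                 vital = adj_chains if vital is None else (vital & adj_chains)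
--             else:
--                 for nid in adj[v]:
--                     if stones.get(nid) == color:
--                         bordering.add(vid_to_chain[nid])
--                     elif nid not in points:
--                         stack.append(nid)
--         vital = bordering if vital is None else (bordering & vital)
--         visited |= points
--         regions.append({
--             'points': points,
--             'bordering_chains': bordering,
--             'vital_chains': vital,
--         })
--     return regions
-- ===== Notes on version B (the rewrite author's own statement) =====
-- stated objective: alternative
-- what changed: B fuses A's two phases per region into one flood-fill pass: bordering chains and the Benson vitality intersection are accumulated while the region is discovered (vital starts as None and is intersected at each empty point), so the second loop that re-scans every empty point's neighbourhood disappears; regions with no empty point fall back to vital = bordering.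
import Mathlib
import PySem

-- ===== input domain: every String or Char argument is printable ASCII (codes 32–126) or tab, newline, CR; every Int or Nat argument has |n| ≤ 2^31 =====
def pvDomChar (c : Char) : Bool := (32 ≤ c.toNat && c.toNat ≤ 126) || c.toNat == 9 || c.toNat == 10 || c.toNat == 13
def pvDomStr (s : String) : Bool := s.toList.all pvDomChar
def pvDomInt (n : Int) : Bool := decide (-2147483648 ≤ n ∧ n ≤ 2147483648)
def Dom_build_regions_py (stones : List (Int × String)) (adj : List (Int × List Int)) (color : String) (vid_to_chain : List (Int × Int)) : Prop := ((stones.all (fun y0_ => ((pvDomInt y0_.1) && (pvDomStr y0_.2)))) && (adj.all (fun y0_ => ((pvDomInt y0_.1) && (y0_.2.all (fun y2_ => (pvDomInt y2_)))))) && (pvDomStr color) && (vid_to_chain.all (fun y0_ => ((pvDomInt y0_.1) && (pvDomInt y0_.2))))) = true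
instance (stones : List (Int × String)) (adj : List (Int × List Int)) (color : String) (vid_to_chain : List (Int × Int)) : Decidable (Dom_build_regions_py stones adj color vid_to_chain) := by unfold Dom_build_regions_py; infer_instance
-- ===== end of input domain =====

-- B fuses A's two phases per region into one flood-fill pass (the Benson vitality
-- intersection is accumulated while the region is discovered instead of by a second
-- scan over the empty points); objective: alternative, equal return value.
-- Python iterates some sets (adj values, `for p in points`); the results (sets) do
-- not depend on that iteration order, and both ports fix insertion order throughout.

-- ===== PORT A =====
-- inner `for nid in adj[v]` loop of A's flood fill (updates stack and bordering)
def pvScanA (sD : PySem.Dict Int String) (color : String) (cD : PySem.Dict Int Int)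
    (pts' : PySem.Set Int) (ns : List Int) (st : List Int) (bdr : PySem.Set Int) :
    List Int × PySem.Set Int :=
  ns.foldl (fun (acc : List Int × PySem.Set Int) nid =>
    if sD.get? nid == some color then (acc.1, PySem.Set.add acc.2 (cD.getD nid 0))
    else if !PySem.Set.contains pts' nid then (nid :: acc.1, acc.2)
    else acc) (st, bdr)

-- A's `while stack` flood fill; fuel = 1 + total adjacency size bounds the number of
-- pops (1 initial element, and the pushes over a whole region are at most the total
-- adjacency size), so the fuel never runs out on the call below.
def pvFillA (sD : PySem.Dict Int String) (aD : PySem.Dict Int (List Int)) (color : String)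
    (cD : PySem.Dict Int Int) :
    Nat → List Int → PySem.Set Int → PySem.Set Int → PySem.Set Int × PySem.Set Int
  | 0, _, pts, bdr => (pts, bdr)
  | _ + 1, [], pts, bdr => (pts, bdr)
  | f + 1, v :: st, pts, bdr =>
    if PySem.Set.contains pts v then pvFillA sD aD color cD f st pts bdr
    else
      let pts' := PySem.Set.add pts v
      let sb := pvScanA sD color cD pts' (aD.getD v []) st bdr
      pvFillA sD aD color cD f sb.1 pts' sb.2

-- inner `for nid in adj[p]` loop collecting adj_chains of one empty point
def pvChainScan (sD : PySem.Dict Int String) (color : String) (cD : PySem.Dict Int Int)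
    (ns : List Int) (ac : PySem.Set Int) : PySem.Set Int :=
  ns.foldl (fun ac nid =>
    if sD.get? nid == some color then PySem.Set.add ac (cD.getD nid 0) else ac) ac

def pvAdjChainsA (sD : PySem.Dict Int String) (aD : PySem.Dict Int (List Int)) (color : String)
    (cD : PySem.Dict Int Int) (p : Int) : PySem.Set Int :=
  pvChainScan sD color cD (aD.getD p []) PySem.Set.empty

-- A's vitality phase: `for p in points: … vital &= adj_chains; if not vital: break`
def pvVitalA (sD : PySem.Dict Int String) (aD : PySem.Dict Int (List Int)) (color : String)
    (cD : PySem.Dict Int Int) : List Int → PySem.Set Int → PySem.Set Int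
  | [], vital => vital
  | p :: ps, vital =>
    if sD.get? p = none then
      let vital' := PySem.Set.inter vital (pvAdjChainsA sD aD color cD p)
      if vital' = [] then vital' else pvVitalA sD aD color cD ps vital'
    else pvVitalA sD aD color cD ps vital

def build_regions_py (stones : List (Int × String)) (adj : List (Int × List Int)) (color : String) (vid_to_chain : List (Int × Int)) : List (List (String × List Int)) :=
  let sD := PySem.Dict.ofList stones
  let aD := PySem.Dict.ofList adj
  let cD := PySem.Dict.ofList vid_to_chain
  let fuel := 1 + (aD.items.map (fun kv => kv.2.length)).sum
  (aD.keys.foldl (fun (acc : List (List (String × List Int)) × PySem.Set Int) vid =>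
      if PySem.Set.contains acc.2 vid || sD.get? vid == some color then acc
      else
        let pb := pvFillA sD aD color cD fuel [vid] PySem.Set.empty PySem.Set.empty
        -- `vital = set(bordering)` copies the set: on immutable values the copy is the set itself
        let vital := pvVitalA sD aD color cD pb.1 pb.2
        (acc.1 ++ [[("points", pb.1), ("bordering_chains", pb.2), ("vital_chains", vital)]],
         PySem.Set.union acc.2 pb.1))
    ([], PySem.Set.empty)).1

-- ===== PORT B =====
-- inner neighbour loop of B's fill for a stone vertex (same loop as in A's fill)
def pvScanB (sD : PySem.Dict Int String) (color : String) (cD : PySem.Dict Int Int)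
    (pts' : PySem.Set Int) (ns : List Int) (st : List Int) (bdr : PySem.Set Int) :
    List Int × PySem.Set Int :=
  ns.foldl (fun (acc : List Int × PySem.Set Int) nid =>
    if sD.get? nid == some color then (acc.1, PySem.Set.add acc.2 (cD.getD nid 0))
    else if !PySem.Set.contains pts' nid then (nid :: acc.1, acc.2)
    else acc) (st, bdr)

-- inner neighbour loop of B's fill for an empty vertex (also collects adj_chains)
def pvScanB3 (sD : PySem.Dict Int String) (color : String) (cD : PySem.Dict Int Int)
    (pts' : PySem.Set Int) (ns : List Int) (st : List Int) (bdr ac : PySem.Set Int) :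
    List Int × PySem.Set Int × PySem.Set Int :=
  ns.foldl (fun (acc : List Int × PySem.Set Int × PySem.Set Int) nid =>
    if sD.get? nid == some color then
      let c := cD.getD nid 0
      (acc.1, PySem.Set.add acc.2.1 c, PySem.Set.add acc.2.2 c)
    else if !PySem.Set.contains pts' nid then (nid :: acc.1, acc.2.1, acc.2.2)
    else acc) (st, bdr, ac)

-- B's fused `while stack` loop: flood fill plus the running vitality intersection
def pvFillB (sD : PySem.Dict Int String) (aD : PySem.Dict Int (List Int)) (color : String)
    (cD : PySem.Dict Int Int) :
    Nat → List Int → PySem.Set Int → PySem.Set Int → Option (PySem.Set Int) →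
    PySem.Set Int × PySem.Set Int × Option (PySem.Set Int)
  | 0, _, pts, bdr, vo => (pts, bdr, vo)
  | _ + 1, [], pts, bdr, vo => (pts, bdr, vo)
  | f + 1, v :: st, pts, bdr, vo =>
    if PySem.Set.contains pts v then pvFillB sD aD color cD f st pts bdr vo
    else
      let pts' := PySem.Set.add pts v
      if sD.get? v = none then
        let sba := pvScanB3 sD color cD pts' (aD.getD v []) st bdr PySem.Set.empty
        pvFillB sD aD color cD f sba.1 pts' sba.2.1
          (some (match vo with
                 | none => sba.2.2
                 | some s => PySem.Set.inter s sba.2.2))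
      else
        let sb := pvScanB sD color cD pts' (aD.getD v []) st bdr
        pvFillB sD aD color cD f sb.1 pts' sb.2 vo

def build_regions_py_alt (stones : List (Int × String)) (adj : List (Int × List Int)) (color : String) (vid_to_chain : List (Int × Int)) : List (List (String × List Int)) :=
  let sD := PySem.Dict.ofList stones
  let aD := PySem.Dict.ofList adj
  let cD := PySem.Dict.ofList vid_to_chain
  let fuel := 1 + (aD.items.map (fun kv => kv.2.length)).sum
  (aD.keys.foldl (fun (acc : List (List (String × List Int)) × PySem.Set Int) vid =>
      if PySem.Set.contains acc.2 vid || sD.get? vid == some color then acc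
      else
        let pb := pvFillB sD aD color cD fuel [vid] PySem.Set.empty PySem.Set.empty none
        -- `vital = bordering if vital is None else (bordering & vital)`
        let vital := match pb.2.2 with
                     | none => pb.2.1
                     | some s => PySem.Set.inter pb.2.1 s
        (acc.1 ++ [[("points", pb.1), ("bordering_chains", pb.2.1), ("vital_chains", vital)]],
         PySem.Set.union acc.2 pb.1))
    ([], PySem.Set.empty)).1

-- ===== PRECONDITION & SPEC =====
-- A raises KeyError exactly when the flood fill looks up a vertex missing from adj
-- (`adj[v]`) or a `color` neighbour missing from vid_to_chain (`vid_to_chain[nid]`);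
-- the looked-up vertices are precisely the non-`color` keys of adj together with
-- their neighbours, so Pre_ requires: for every non-`color` key of adj, each of its
-- `color` neighbours is a key of vid_to_chain and each other neighbour a key of adj.
def Pre_build_regions_py (stones : List (Int × String)) (adj : List (Int × List Int)) (color : String) (vid_to_chain : List (Int × Int)) : Prop :=
  ((PySem.Dict.ofList adj).items.all (fun kv =>
    ((PySem.Dict.ofList stones).get? kv.1 == some color)
    || kv.2.all (fun n =>
         if (PySem.Dict.ofList stones).get? n == some color
         then (PySem.Dict.ofList vid_to_chain).contains n
         else (PySem.Dict.ofList adj).contains n))) = true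
instance (stones : List (Int × String)) (adj : List (Int × List Int)) (color : String) (vid_to_chain : List (Int × Int)) : Decidable (Pre_build_regions_py stones adj color vid_to_chain) := by unfold Pre_build_regions_py; infer_instance

def pvWitness_build_regions_py : (List (Int × String)) × (List (Int × List Int)) × String × (List (Int × Int)) :=
  ([(1, "black")], [(0, [1]), (1, [0])], "black", [(1, 7)])

def Spec_build_regions_py (stones : List (Int × String)) (adj : List (Int × List Int)) (color : String) (vid_to_chain : List (Int × Int)) (out : List (List (String × List Int))) : Prop := out = build_regions_py_alt stones adj color vid_to_chain
instance (stones : List (Int × String)) (adj : List (Int × List Int)) (color : String) (vid_to_chain : List (Int × Int)) (out : List (List (String × List Int))) : Decidable (Spec_build_regions_py stones adj color vid_to_chain out) := by unfold Spec_build_regions_py; infer_instance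

-- ===== CLAIM (what is proved, stated in full; the proofs are below) =====
def Claim_equal_build_regions_py : Prop := ∀ (stones : List (Int × String)) (adj : List (Int × List Int)) (color : String) (vid_to_chain : List (Int × Int)), Dom_build_regions_py stones adj color vid_to_chain → Pre_build_regions_py stones adj color vid_to_chain → Spec_build_regions_py stones adj color vid_to_chain (build_regions_py stones adj color vid_to_chain)

-- ===== LEMMAS AND PROOFS =====

-- the vitality-accumulator update along a list of region points (describes B's extra state)
def pvVup (sD : PySem.Dict Int String) (aD : PySem.Dict Int (List Int)) (color : String)
    (cD : PySem.Dict Int Int) (vo : Option (PySem.Set Int)) (l : List Int) :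
    Option (PySem.Set Int) :=
  l.foldl (fun o p =>
    if sD.get? p = none then
      some (match o with
            | none => pvAdjChainsA sD aD color cD p
            | some s => PySem.Set.inter s (pvAdjChainsA sD aD color cD p))
    else o) vo

def pvFin (c : PySem.Set Int) (vo : Option (PySem.Set Int)) : PySem.Set Int :=
  match vo with
  | none => c
  | some s => PySem.Set.inter c s

-- "chain x is adjacent to every empty point of l"
def pvPred (sD : PySem.Dict Int String) (aD : PySem.Dict Int (List Int)) (color : String)
    (cD : PySem.Dict Int Int) (l : List Int) (x : Int) : Bool :=
  l.all (fun p =>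
    if sD.get? p = none then PySem.Set.contains (pvAdjChainsA sD aD color cD p) x else true)

lemma pvScanB_eq_pvScanA : pvScanB = pvScanA := rfl

lemma pvScanB3_eq (sD : PySem.Dict Int String) (color : String) (cD : PySem.Dict Int Int)
    (pts' : PySem.Set Int) :
    ∀ (ns st : List Int) (bdr ac : PySem.Set Int),
      pvScanB3 sD color cD pts' ns st bdr ac =
        ((pvScanA sD color cD pts' ns st bdr).1,
         (pvScanA sD color cD pts' ns st bdr).2,
         pvChainScan sD color cD ns ac) := by
  intro ns
  induction ns with
  | nil => intro st bdr ac; rfl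
  | cons n ns ih =>
    intro st bdr ac
    simp only [pvScanB3, pvScanA, pvChainScan, List.foldl_cons] at *
    by_cases h1 : (sD.get? n == some color) = true
    · simp only [h1, if_true]
      exact ih st (PySem.Set.add bdr (cD.getD n 0)) (PySem.Set.add ac (cD.getD n 0))
    · simp only [h1, if_false, Bool.false_eq_true]
      by_cases h2 : (!PySem.Set.contains pts' n) = true
      · simp only [h2, if_true]
        exact ih (n :: st) bdr ac
      · simp only [h2, if_false, Bool.false_eq_true]
        exact ih st bdr ac

lemma pvFillA_prefix (sD : PySem.Dict Int String) (aD : PySem.Dict Int (List Int)) (color : String)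
    (cD : PySem.Dict Int Int) :
    ∀ (f : Nat) (st : List Int) (pts bdr : PySem.Set Int),
      ∃ r, (pvFillA sD aD color cD f st pts bdr).1 = pts ++ r := by
  intro f
  induction f with
  | zero => intro st pts bdr; exact ⟨[], by simp [pvFillA]⟩
  | succ f ih =>
    intro st pts bdr
    cases st with
    | nil => exact ⟨[], by simp [pvFillA]⟩
    | cons v st =>
      by_cases hv : v ∈ pts
      · have hstep : pvFillA sD aD color cD (f + 1) (v :: st) pts bdr
            = pvFillA sD aD color cD f st pts bdr := by
          simp [pvFillA, hv]
        rw [hstep]; exact ih st pts bdr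
      · have hstep : pvFillA sD aD color cD (f + 1) (v :: st) pts bdr
            = pvFillA sD aD color cD f
                (pvScanA sD color cD (PySem.Set.add pts v) (aD.getD v []) st bdr).1
                (PySem.Set.add pts v)
                (pvScanA sD color cD (PySem.Set.add pts v) (aD.getD v []) st bdr).2 := by
          simp [pvFillA, hv]
        rw [hstep]
        obtain ⟨r, hr⟩ := ih
          (pvScanA sD color cD (PySem.Set.add pts v) (aD.getD v []) st bdr).1
          (PySem.Set.add pts v)
          (pvScanA sD color cD (PySem.Set.add pts v) (aD.getD v []) st bdr).2
        refine ⟨v :: r, ?_⟩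
        rw [hr, PySem.Set.add_of_not_mem hv]
        simp

lemma pvVup_cons_stone (sD : PySem.Dict Int String) (aD : PySem.Dict Int (List Int))
    (color : String) (cD : PySem.Dict Int Int) (vo : Option (PySem.Set Int)) (v : Int)
    (l : List Int) (hs : ¬ sD.get? v = none) :
    pvVup sD aD color cD vo (v :: l) = pvVup sD aD color cD vo l := by
  simp [pvVup, hs]

lemma pvVup_cons_empty (sD : PySem.Dict Int String) (aD : PySem.Dict Int (List Int))
    (color : String) (cD : PySem.Dict Int Int) (vo : Option (PySem.Set Int)) (v : Int)
    (l : List Int) (hs : sD.get? v = none) :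
    pvVup sD aD color cD vo (v :: l) =
      pvVup sD aD color cD
        (some (match vo with
               | none => pvAdjChainsA sD aD color cD v
               | some s => PySem.Set.inter s (pvAdjChainsA sD aD color cD v))) l := by
  simp [pvVup, hs]

lemma pvFillB_eq (sD : PySem.Dict Int String) (aD : PySem.Dict Int (List Int)) (color : String)
    (cD : PySem.Dict Int Int) :
    ∀ (f : Nat) (st : List Int) (pts bdr : PySem.Set Int) (vo : Option (PySem.Set Int)),
      pvFillB sD aD color cD f st pts bdr vo =
        ((pvFillA sD aD color cD f st pts bdr).1,
         (pvFillA sD aD color cD f st pts bdr).2,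
         pvVup sD aD color cD vo
           ((pvFillA sD aD color cD f st pts bdr).1.drop pts.length)) := by
  intro f
  induction f with
  | zero =>
    intro st pts bdr vo
    simp [pvFillA, pvFillB, pvVup, List.drop_length]
  | succ f ih =>
    intro st pts bdr vo
    cases st with
    | nil => simp [pvFillA, pvFillB, pvVup, List.drop_length]
    | cons v st =>
      by_cases hv : v ∈ pts
      · have hstepA : pvFillA sD aD color cD (f + 1) (v :: st) pts bdr
            = pvFillA sD aD color cD f st pts bdr := by simp [pvFillA, hv]
        have hstepB : pvFillB sD aD color cD (f + 1) (v :: st) pts bdr vo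
            = pvFillB sD aD color cD f st pts bdr vo := by simp [pvFillB, hv]
        rw [hstepA, hstepB]
        exact ih st pts bdr vo
      · have hpts : PySem.Set.add pts v = pts ++ [v] := PySem.Set.add_of_not_mem hv
        obtain ⟨r, hr⟩ := pvFillA_prefix sD aD color cD f
          (pvScanA sD color cD (PySem.Set.add pts v) (aD.getD v []) st bdr).1
          (PySem.Set.add pts v)
          (pvScanA sD color cD (PySem.Set.add pts v) (aD.getD v []) st bdr).2
        have hstepA : pvFillA sD aD color cD (f + 1) (v :: st) pts bdr
            = pvFillA sD aD color cD f
                (pvScanA sD color cD (PySem.Set.add pts v) (aD.getD v []) st bdr).1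
                (PySem.Set.add pts v)
                (pvScanA sD color cD (PySem.Set.add pts v) (aD.getD v []) st bdr).2 := by
          simp [pvFillA, hv]
        have hdrop1 : ((pvFillA sD aD color cD f
            (pvScanA sD color cD (PySem.Set.add pts v) (aD.getD v []) st bdr).1
            (PySem.Set.add pts v)
            (pvScanA sD color cD (PySem.Set.add pts v) (aD.getD v []) st bdr).2).1).drop pts.length
            = v :: r := by
          rw [hr, hpts, List.append_assoc, List.drop_left]
          rfl
        have hdrop2 : ((pvFillA sD aD color cD f
            (pvScanA sD color cD (PySem.Set.add pts v) (aD.getD v []) st bdr).1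
            (PySem.Set.add pts v)
            (pvScanA sD color cD (PySem.Set.add pts v) (aD.getD v []) st bdr).2).1).drop (PySem.Set.add pts v).length
            = r := by
          rw [hr]
          exact List.drop_left
        by_cases hs : sD.get? v = none
        · have hstepB : pvFillB sD aD color cD (f + 1) (v :: st) pts bdr vo
              = pvFillB sD aD color cD f
                  (pvScanA sD color cD (PySem.Set.add pts v) (aD.getD v []) st bdr).1
                  (PySem.Set.add pts v)
                  (pvScanA sD color cD (PySem.Set.add pts v) (aD.getD v []) st bdr).2
                  (some (match vo with
                         | none => pvAdjChainsA sD aD color cD v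
                         | some s => PySem.Set.inter s (pvAdjChainsA sD aD color cD v))) := by
            simp only [pvFillB, pvScanB3_eq]
            simp [hv, hs, pvAdjChainsA]
          rw [hstepA, hstepB, ih, hdrop1, hdrop2,
            pvVup_cons_empty sD aD color cD vo v r hs]
        · have hstepB : pvFillB sD aD color cD (f + 1) (v :: st) pts bdr vo
              = pvFillB sD aD color cD f
                  (pvScanA sD color cD (PySem.Set.add pts v) (aD.getD v []) st bdr).1
                  (PySem.Set.add pts v)
                  (pvScanA sD color cD (PySem.Set.add pts v) (aD.getD v []) st bdr).2 vo := by
            simp only [pvFillB, pvScanB_eq_pvScanA]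
            simp [hv, hs]
          rw [hstepA, hstepB, ih, hdrop1, hdrop2,
            pvVup_cons_stone sD aD color cD vo v r hs]

lemma pvInter_eq_filter (s t : PySem.Set Int) :
    PySem.Set.inter s t = s.filter (fun x => PySem.Set.contains t x) := rfl

lemma pvVitalA_eq_filter (sD : PySem.Dict Int String) (aD : PySem.Dict Int (List Int))
    (color : String) (cD : PySem.Dict Int Int) :
    ∀ (l : List Int) (b : PySem.Set Int),
      pvVitalA sD aD color cD l b = b.filter (pvPred sD aD color cD l) := by
  intro l
  induction l with
  | nil =>
    intro b
    simp only [pvVitalA]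
    symm
    apply List.filter_eq_self.mpr
    intro a ha
    rfl
  | cons p ps ih =>
    intro b
    by_cases hp : sD.get? p = none
    · simp only [pvVitalA, hp, if_pos]
      by_cases hvv : PySem.Set.inter b (pvAdjChainsA sD aD color cD p) = []
      · rw [if_pos hvv, hvv]
        symm
        rw [List.filter_eq_nil_iff]
        intro x hx hpred
        have h1 : pvPred sD aD color cD (p :: ps) x = true := hpred
        simp only [pvPred, List.all_cons, hp, if_pos, Bool.and_eq_true] at h1
        have hch : x ∈ pvAdjChainsA sD aD color cD p :=
          (PySem.Set.contains_iff _ x).mp h1.1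
        have hmem : x ∈ PySem.Set.inter b (pvAdjChainsA sD aD color cD p) :=
          (PySem.Set.mem_inter b _ x).mpr ⟨hx, hch⟩
        rw [hvv] at hmem
        exact absurd hmem (List.not_mem_nil)
      · rw [if_neg hvv, ih]
        rw [pvInter_eq_filter, List.filter_filter]
        apply List.filter_congr
        intro x hx
        by_cases hxc : x ∈ pvAdjChainsA sD aD color cD p <;>
          simp [pvPred, hp, hxc, List.all_cons, Bool.and_comm]
    · simp only [pvVitalA, hp, if_false]
      rw [ih]
      apply List.filter_congr
      intro x hx
      simp [pvPred, hp, List.all_cons]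

lemma pvFin_pvVup (sD : PySem.Dict Int String) (aD : PySem.Dict Int (List Int)) (color : String)
    (cD : PySem.Dict Int Int) :
    ∀ (l : List Int) (vo : Option (PySem.Set Int)) (c : PySem.Set Int),
      pvFin c (pvVup sD aD color cD vo l) =
        (pvFin c vo).filter (pvPred sD aD color cD l) := by
  intro l
  induction l with
  | nil =>
    intro vo c
    simp only [pvVup, List.foldl_nil]
    symm
    apply List.filter_eq_self.mpr
    intro a ha
    rfl
  | cons p ps ih =>
    intro vo c
    by_cases hp : sD.get? p = none
    · rw [pvVup_cons_empty sD aD color cD vo p ps hp, ih]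
      cases vo with
      | none =>
        simp only [pvFin]
        rw [pvInter_eq_filter, List.filter_filter]
        apply List.filter_congr
        intro x hx
        by_cases hxc : x ∈ pvAdjChainsA sD aD color cD p <;>
          simp [pvPred, hp, hxc, List.all_cons, Bool.and_comm]
      | some s =>
        simp only [pvFin]
        rw [pvInter_eq_filter c (PySem.Set.inter s (pvAdjChainsA sD aD color cD p)),
          List.filter_filter, pvInter_eq_filter c s, List.filter_filter]
        apply List.filter_congr
        intro x hx
        by_cases hxs : x ∈ s <;> by_cases hxc : x ∈ pvAdjChainsA sD aD color cD p <;>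
          simp [pvPred, hp, hxs, hxc, List.all_cons, Bool.and_comm]
    · rw [pvVup_cons_stone sD aD color cD vo p ps hp, ih]
      apply List.filter_congr
      intro x hx
      simp [pvPred, hp, List.all_cons]

-- ===== VERDICT (by name: the statement is the Claim_ definition above) =====
theorem build_regions_py_spec : Claim_equal_build_regions_py := by
  intro stones adj color vid_to_chain _ _
  unfold Spec_build_regions_py
  simp only [build_regions_py, build_regions_py_alt]
  congr 1
  apply PySem.List.foldl_congr_mem
  intro acc vid _
  by_cases hg : (PySem.Set.contains acc.2 vid
      || (PySem.Dict.ofList stones).get? vid == some color) = true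
  · simp only [hg, if_true]
  · simp only [hg, Bool.false_eq_true, if_false]
    rw [pvFillB_eq]
    have hA1 := pvVitalA_eq_filter (PySem.Dict.ofList stones) (PySem.Dict.ofList adj) color
      (PySem.Dict.ofList vid_to_chain)
      (pvFillA (PySem.Dict.ofList stones) (PySem.Dict.ofList adj) color
        (PySem.Dict.ofList vid_to_chain)
        (1 + (((PySem.Dict.ofList adj).items.map (fun kv => kv.2.length)).sum))
        [vid] PySem.Set.empty PySem.Set.empty).1
      (pvFillA (PySem.Dict.ofList stones) (PySem.Dict.ofList adj) color
        (PySem.Dict.ofList vid_to_chain)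
        (1 + (((PySem.Dict.ofList adj).items.map (fun kv => kv.2.length)).sum))
        [vid] PySem.Set.empty PySem.Set.empty).2
    have hB1 := pvFin_pvVup (PySem.Dict.ofList stones) (PySem.Dict.ofList adj) color
      (PySem.Dict.ofList vid_to_chain)
      ((pvFillA (PySem.Dict.ofList stones) (PySem.Dict.ofList adj) color
        (PySem.Dict.ofList vid_to_chain)
        (1 + (((PySem.Dict.ofList adj).items.map (fun kv => kv.2.length)).sum))
        [vid] PySem.Set.empty PySem.Set.empty).1.drop (PySem.Set.empty : PySem.Set Int).length)
      none
      (pvFillA (PySem.Dict.ofList stones) (PySem.Dict.ofList adj) color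
        (PySem.Dict.ofList vid_to_chain)
        (1 + (((PySem.Dict.ofList adj).items.map (fun kv => kv.2.length)).sum))
        [vid] PySem.Set.empty PySem.Set.empty).2
    simp only [List.length_nil, List.drop_zero, PySem.Set.empty] at hA1 hB1 ⊢
    simp only [pvFin] at hB1
    rw [hA1, ← hB1]
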